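-- pv_equiv track=rewrite | github.com/uni-dubna-2023-fall/code | mychachv/homeworc_02.py | lensort
-- ===== SOURCE A (Python) =====
-- def lensort(lst):
--     upper = []
--     lower = []
--
--     for string in lst:
--         if string[0].isupper():
--             upper.append(string)
--         else:
--             lower.append(string)
--
--     upper.sort()
--     lower.sort()
--
--     return upper + lower
-- ===== SOURCE B (Python) =====
-- def lensort(lst):
--     return sorted(lst, key=lambda s: (not s[0].isupper(), s))
-- ===== Notes on version B (the rewrite author's own statement) =====
-- stated objective: idiomatic
-- what changed: Replaces the explicit partition into two lists, two sorts and a concatenation with a single keyed sort whose tuple key (not s[0].isupper(), s) orders upper-first strings before lower-first ones and alphabetically within each group.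
import Mathlib
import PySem

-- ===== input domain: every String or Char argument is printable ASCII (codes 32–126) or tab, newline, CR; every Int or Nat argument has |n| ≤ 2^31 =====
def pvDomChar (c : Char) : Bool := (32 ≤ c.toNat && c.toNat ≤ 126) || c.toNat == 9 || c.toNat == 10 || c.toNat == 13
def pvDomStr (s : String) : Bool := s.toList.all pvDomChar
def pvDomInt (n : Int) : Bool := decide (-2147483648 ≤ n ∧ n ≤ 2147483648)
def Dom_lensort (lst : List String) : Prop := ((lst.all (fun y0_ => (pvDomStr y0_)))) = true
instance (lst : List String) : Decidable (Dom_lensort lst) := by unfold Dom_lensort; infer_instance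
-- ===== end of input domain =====

-- B replaces A's explicit partition-into-two-lists + two sorts + concatenation with one
-- keyed sort (key = (not s[0].isupper(), s)); same cost, more idiomatic.


-- shared helper: the Python expression `s[0].isupper()` (both sources contain it verbatim);
-- `.getD false` is only reached on the empty string, which Pre_lensort excludes (IndexError)
def pvUpFirst (s : String) : Bool := ((PySem.Str.pyGet? s 0).map PySem.Chars.isupper).getD false

-- ===== PORT A =====
def lensort (lst : List String) : List String :=
  let p := lst.foldl
    (fun (acc : List String × List String) s =>
      if pvUpFirst s then (acc.1 ++ [s], acc.2) else (acc.1, acc.2 ++ [s]))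
    ([], [])
  PySem.List.sorted p.1 (fun x => x) ++ PySem.List.sorted p.2 (fun x => x)

-- ===== PORT B =====
def lensort_alt (lst : List String) : List String :=
  PySem.List.sorted2 lst (fun s => !pvUpFirst s) (fun s => s)

-- ===== PRECONDITION & SPEC =====
-- Pre_ excludes lists containing an empty string, on which Python's s[0] raises IndexError (in A and in B).
def Pre_lensort (lst : List String) : Prop := ∀ s ∈ lst, s ≠ ""
instance (lst : List String) : Decidable (Pre_lensort lst) := by unfold Pre_lensort; infer_instance
def pvWitness_lensort : List String := ["Bc", "ab", "Zz", "ab"]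
def Spec_lensort (lst : List String) (out : List String) : Prop := out = lensort_alt lst
instance (lst : List String) (out : List String) : Decidable (Spec_lensort lst out) := by unfold Spec_lensort; infer_instance

-- ===== CLAIM (what is proved, stated in full; the proofs are below) =====
def Claim_equal_lensort : Prop := ∀ (lst : List String), Dom_lensort lst → Pre_lensort lst → Spec_lensort lst (lensort lst)

-- ===== LEMMAS AND PROOFS =====

-- the tuple comparison used by sorted2 with first key (!pvUpFirst ·), second key id
def pvB2 (a b : String) : Bool :=
  decide ((!pvUpFirst a) < (!pvUpFirst b)) ||
    !decide ((!pvUpFirst b) < (!pvUpFirst a)) && decide (a < b)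

theorem insertBy_congr_mem {α : Type} (b1 b2 : α → α → Bool) (x : α) (ys : List α)
    (h : ∀ y ∈ ys, b1 x y = b2 x y) :
    PySem.List.insertBy b1 x ys = PySem.List.insertBy b2 x ys := by
  induction ys with
  | nil => rfl
  | cons y ys ih =>
    simp only [PySem.List.insertBy, h y (by simp)]
    split <;> simp_all

theorem insertBy_append_right {α : Type} (b : α → α → Bool) (x : α) (U L : List α)
    (h : ∀ u ∈ U, b x u = false) :
    PySem.List.insertBy b x (U ++ L) = U ++ PySem.List.insertBy b x L := by
  induction U with
  | nil => rfl
  | cons u U ih =>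
    simp only [List.cons_append, PySem.List.insertBy, h u (by simp)]
    simp only [Bool.false_eq_true, if_false, ih (fun v hv => h v (by simp [hv]))]

theorem insertBy_append_left {α : Type} (b : α → α → Bool) (x : α) (U L : List α)
    (h : ∀ l ∈ L, b x l = true) :
    PySem.List.insertBy b x (U ++ L) = PySem.List.insertBy b x U ++ L := by
  induction U with
  | nil =>
    cases L with
    | nil => rfl
    | cons l L => simp [PySem.List.insertBy, h l (by simp)]
  | cons u U ih =>
    simp only [List.cons_append, PySem.List.insertBy, ih]
    split <;> simp

-- partition loop of A = two filters
theorem lensort_fold_eq_filter (lst : List String) (U L : List String) :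
    lst.foldl
      (fun (acc : List String × List String) s =>
        if pvUpFirst s then (acc.1 ++ [s], acc.2) else (acc.1, acc.2 ++ [s]))
      (U, L)
    = (U ++ lst.filter pvUpFirst, L ++ lst.filter (fun s => !pvUpFirst s)) := by
  induction lst generalizing U L with
  | nil => simp
  | cons s lst ih =>
    by_cases h : pvUpFirst s = true <;>
      simp [h, ih, List.append_assoc]

-- B's single keyed sort = sorted uppers ++ sorted lowers
theorem sorted2_eq_split (lst : List String) :
    PySem.List.sorted2 lst (fun s => !pvUpFirst s) (fun s => s)
    = PySem.List.sorted (lst.filter pvUpFirst) (fun x => x)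
      ++ PySem.List.sorted (lst.filter (fun s => !pvUpFirst s)) (fun x => x) := by
  induction lst using List.reverseRecOn with
  | nil => rfl
  | append_singleton lst x ih =>
    have hB2 : PySem.List.sorted2 (lst ++ [x]) (fun s => !pvUpFirst s) (fun s => s)
        = PySem.List.insertBy pvB2 x
            (PySem.List.sorted2 lst (fun s => !pvUpFirst s) (fun s => s)) := by
      simp only [PySem.List.sorted2, List.foldl_append, List.foldl_cons, List.foldl_nil]
      rfl
    have hS : ∀ (ys : List String) (x : String),
        PySem.List.sorted (ys ++ [x]) (fun z => z)
        = PySem.List.insertBy (fun a b => decide (a < b)) x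
            (PySem.List.sorted ys (fun z => z)) := by
      intro ys x
      rw [PySem.List.sorted_eq_foldl_insertBy, PySem.List.sorted_eq_foldl_insertBy,
        List.foldl_append]
      rfl
    have hUmem : ∀ u ∈ PySem.List.sorted (lst.filter pvUpFirst) (fun z => z),
        pvUpFirst u = true := by
      intro u hu
      rw [PySem.List.mem_sorted] at hu
      exact (List.mem_filter.mp hu).2
    have hLmem : ∀ l ∈ PySem.List.sorted (lst.filter (fun s => !pvUpFirst s)) (fun z => z),
        pvUpFirst l = false := by
      intro l hl
      rw [PySem.List.mem_sorted] at hl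
      simpa using (List.mem_filter.mp hl).2
    rw [hB2, ih]
    by_cases hx : pvUpFirst x = true
    · -- x goes into the upper group
      rw [insertBy_append_left pvB2 x _ _
          (fun l hl => by simp [pvB2, hx, hLmem l hl]),
        insertBy_congr_mem pvB2 (fun a b => decide (a < b)) x _
          (fun u hu => by simp [pvB2, hx, hUmem u hu]),
        ← hS]
      simp [List.filter_append, hx]
    · -- x goes into the lower group
      rw [insertBy_append_right pvB2 x _ _
          (fun u hu => by simp [pvB2, hx, hUmem u hu]),
        insertBy_congr_mem pvB2 (fun a b => decide (a < b)) x _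
          (fun l hl => by simp [pvB2, hx, hLmem l hl]),
        ← hS]
      simp [List.filter_append, hx]

-- ===== VERDICT (by name: the statement is the Claim_ definition above) =====
theorem lensort_spec : Claim_equal_lensort := by
  intro lst _ _
  show lensort lst = lensort_alt lst
  rw [lensort, lensort_alt, sorted2_eq_split, lensort_fold_eq_filter]
  simp
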